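-- pv_equiv track=rewrite | github.com/Shoaib2011436642/JVAI_Financial_Policy_Chatbot_Using_Sentence-Tranformers-Embedding_Faiss_Md.-Shoaib-Ahmed | app.py | _filter_hits_by_must
-- ===== SOURCE A (Python) =====
-- _CANON = {
--     "debt": ["debt", "borrowings", "net interest", "interest expense", "interest revenue"],
--     "taxation": ["tax", "taxation", "gsp", "gross state product", "taxation as a % of gsp"],
--     "gsp": ["gsp", "gross state product"],
--     "net assets": ["net assets", "total assets", "total liabilities"],
--     "superannuation": ["superannuation", "liabilities", "funded", "percentage funding"],
--     "credit rating": ["credit rating", "triple a", "aaa"],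
--     "balanced budget": ["balanced budget", "operating result", "surplus", "economic cycle"],
--     "infrastructure": ["infrastructure", "capital works", "property, plant and equipment"],
-- }
--
-- def _text_has_key(text_l: str, key: str) -> bool:
--     aliases = [key] + _CANON.get(key, [])
--     return any(a in text_l for a in aliases)
--
-- def _filter_hits_by_must(hits, must_keys):
--     if not must_keys:
--         return hits
--     kept = []
--     for h in hits:
--         t = h["text"].lower()
--         if all(_text_has_key(t, k) for k in must_keys):
--             kept.append(h)
--     if not kept:
--         for h in hits:
--             t = h["text"].lower()
--             if any(_text_has_key(t, k) for k in must_keys):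
--                 kept.append(h)
--     return kept or hits
-- ===== SOURCE B (Python) =====
-- _CANON = {
--     "debt": ["debt", "borrowings", "net interest", "interest expense", "interest revenue"],
--     "taxation": ["tax", "taxation", "gsp", "gross state product", "taxation as a % of gsp"],
--     "gsp": ["gsp", "gross state product"],
--     "net assets": ["net assets", "total assets", "total liabilities"],
--     "superannuation": ["superannuation", "liabilities", "funded", "percentage funding"],
--     "credit rating": ["credit rating", "triple a", "aaa"],
--     "balanced budget": ["balanced budget", "operating result", "surplus", "economic cycle"],
--     "infrastructure": ["infrastructure", "capital works", "property, plant and equipment"],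
-- }
--
-- def _text_has_key(text_l: str, key: str) -> bool:
--     aliases = [key] + _CANON.get(key, [])
--     return any(a in text_l for a in aliases)
--
-- def _filter_hits_by_must(hits, must_keys):
--     if not must_keys:
--         return hits
--     n = len(must_keys)
--     scored = [(h, sum(1 for k in must_keys if _text_has_key(h["text"].lower(), k)))
--               for h in hits]
--     full = [h for h, c in scored if c == n]
--     if full:
--         return full
--     partial = [h for h, c in scored if c > 0]
--     return partial if partial else hits
-- ===== Notes on version B (the rewrite author's own statement) =====
-- stated objective: alternative
-- what changed: B replaces A's two separate filter-and-rescan passes (all-match pass, then any-match pass over the same hits) with one scoring pass that counts matched must_keys per hit, followed by threshold selection (count == len, else count > 0, else all hits).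
import Mathlib
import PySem

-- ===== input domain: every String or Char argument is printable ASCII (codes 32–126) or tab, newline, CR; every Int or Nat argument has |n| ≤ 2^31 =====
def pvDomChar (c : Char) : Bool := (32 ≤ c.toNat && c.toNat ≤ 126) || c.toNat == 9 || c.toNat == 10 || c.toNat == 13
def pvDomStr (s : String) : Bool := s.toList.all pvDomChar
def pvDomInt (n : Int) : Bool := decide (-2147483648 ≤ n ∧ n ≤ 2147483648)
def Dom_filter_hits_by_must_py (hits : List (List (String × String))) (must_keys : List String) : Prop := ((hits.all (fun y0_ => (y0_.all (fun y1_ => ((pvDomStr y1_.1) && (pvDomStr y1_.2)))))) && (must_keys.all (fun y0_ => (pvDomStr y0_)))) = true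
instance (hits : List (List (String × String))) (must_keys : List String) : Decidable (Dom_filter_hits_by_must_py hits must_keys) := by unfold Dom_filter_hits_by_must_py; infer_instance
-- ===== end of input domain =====

-- B replaces A's two filter-and-rescan passes by one per-hit match-count pass plus threshold
-- selection; same asymptotic cost (objective: alternative).


-- ===== PORT A =====
-- _CANON (module constant shared by both Pythons' helper _text_has_key)
def pvCanon : PySem.Dict String (List String) := PySem.Dict.mk [
  ("debt", ["debt", "borrowings", "net interest", "interest expense", "interest revenue"]),
  ("taxation", ["tax", "taxation", "gsp", "gross state product", "taxation as a % of gsp"]),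
  ("gsp", ["gsp", "gross state product"]),
  ("net assets", ["net assets", "total assets", "total liabilities"]),
  ("superannuation", ["superannuation", "liabilities", "funded", "percentage funding"]),
  ("credit rating", ["credit rating", "triple a", "aaa"]),
  ("balanced budget", ["balanced budget", "operating result", "surplus", "economic cycle"]),
  ("infrastructure", ["infrastructure", "capital works", "property, plant and equipment"])]

-- _text_has_key (same-module helper, used verbatim by both A and B)
def text_has_key (text_l : String) (key : String) : Bool :=
  (key :: pvCanon.getD key []).any (fun a => PySem.Str.isIn a text_l)

-- h["text"]: first-match dict lookup; Pre_ guarantees the key is present (Python raises KeyError otherwise)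
def hitText (h : List (String × String)) : String :=
  ((PySem.Dict.mk h).get? "text").getD ""

def filter_hits_by_must_py (hits : List (List (String × String))) (must_keys : List String) : List (List (String × String)) :=
  if must_keys.isEmpty then hits
  else
    let kept := hits.foldl (fun kept h =>
      let t := PySem.Str.lower (hitText h)
      if must_keys.all (fun k => text_has_key t k) then kept ++ [h] else kept) []
    let kept := if kept.isEmpty then
        hits.foldl (fun kept h =>
          let t := PySem.Str.lower (hitText h)
          if must_keys.any (fun k => text_has_key t k) then kept ++ [h] else kept) kept
      else kept
    if kept.isEmpty then hits else kept

-- ===== PORT B =====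
def filter_hits_by_must_py_alt (hits : List (List (String × String))) (must_keys : List String) : List (List (String × String)) :=
  if must_keys.isEmpty then hits
  else
    let n := must_keys.length
    let scored := hits.map (fun h =>
      let t := PySem.Str.lower (hitText h)
      (h, must_keys.countP (fun k => text_has_key t k)))
    let full := (scored.filter (fun hc => hc.2 == n)).map (fun hc => hc.1)
    if !full.isEmpty then full
    else
      let part := (scored.filter (fun hc => decide (0 < hc.2))).map (fun hc => hc.1)
      if !part.isEmpty then part else hits

-- ===== PRECONDITION & SPEC =====
-- Pre_ excludes exactly the inputs where Python A raises KeyError: some hit without a "text" key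
-- (when must_keys is empty A returns before any lookup, so those inputs stay admitted).
def Pre_filter_hits_by_must_py (hits : List (List (String × String))) (must_keys : List String) : Prop :=
  must_keys ≠ [] → ∀ h ∈ hits, ((PySem.Dict.mk h).get? "text").isSome
instance (hits : List (List (String × String))) (must_keys : List String) : Decidable (Pre_filter_hits_by_must_py hits must_keys) := by unfold Pre_filter_hits_by_must_py; infer_instance

def pvWitness_filter_hits_by_must_py : (List (List (String × String))) × List String :=
  ([[("text", "Debt and tax levels")], [("text", "nothing here")]], ["debt"])

def Spec_filter_hits_by_must_py (hits : List (List (String × String))) (must_keys : List String) (out : List (List (String × String))) : Prop := out = filter_hits_by_must_py_alt hits must_keys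
instance (hits : List (List (String × String))) (must_keys : List String) (out : List (List (String × String))) : Decidable (Spec_filter_hits_by_must_py hits must_keys out) := by unfold Spec_filter_hits_by_must_py; infer_instance

-- ===== CLAIM (what is proved, stated in full; the proofs are below) =====
def Claim_equal_filter_hits_by_must_py : Prop := ∀ (hits : List (List (String × String))) (must_keys : List String), Dom_filter_hits_by_must_py hits must_keys → Pre_filter_hits_by_must_py hits must_keys → Spec_filter_hits_by_must_py hits must_keys (filter_hits_by_must_py hits must_keys)

-- ===== LEMMAS AND PROOFS =====

-- all p ↔ every occurrence counted: l.all p = (countP p == length)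
theorem pv_all_eq_countP (l : List String) (p : String → Bool) :
    l.all p = (l.countP p == l.length) := by
  rw [Bool.eq_iff_iff, List.all_eq_true, beq_iff_eq]
  exact List.countP_eq_length.symm

-- any p ↔ positive count
theorem pv_any_eq_countP (l : List String) (p : String → Bool) :
    l.any p = decide (0 < l.countP p) := by
  rw [Bool.eq_iff_iff, List.any_eq_true, decide_eq_true_eq]
  exact List.countP_pos_iff.symm

-- selecting the scored hits above a count test = filtering hits by that test on their count
theorem pv_scored_filter (hits : List (List (String × String)))
    (c : List (String × String) → Nat) (q : Nat → Bool) :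
    ((hits.map (fun h => (h, c h))).filter (fun hc => q hc.2)).map (fun hc => hc.1)
      = hits.filter (fun h => q (c h)) := by
  induction hits with
  | nil => rfl
  | cons h t ih =>
    simp only [List.map_cons, List.filter_cons]
    by_cases hq : q (c h) = true <;> simp [hq, ih]

-- the tier selection, abstracted over the two filtered lists
theorem pv_select {α : Type} (F P hits : List α) :
    (if (if F.isEmpty then F ++ P else F).isEmpty then hits
     else (if F.isEmpty then F ++ P else F))
      = if !F.isEmpty then F else if !P.isEmpty then P else hits := by
  by_cases h1 : F.isEmpty <;> by_cases h2 : P.isEmpty <;> simp_all [List.isEmpty_iff]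

theorem filter_hits_by_must_py_spec_aux :
    ∀ hits must_keys, filter_hits_by_must_py hits must_keys = filter_hits_by_must_py_alt hits must_keys := by
  intro hits must_keys
  unfold filter_hits_by_must_py filter_hits_by_must_py_alt
  by_cases hmk : must_keys.isEmpty
  · simp [hmk]
  · simp only [hmk, Bool.false_eq_true, if_false]
    rw [PySem.List.foldl_append_if, PySem.List.foldl_append_if,
        pv_scored_filter hits _ (fun c => c == must_keys.length),
        pv_scored_filter hits _ (fun c => decide (0 < c))]
    have hP : (fun h => must_keys.all (fun k => text_has_key (PySem.Str.lower (hitText h)) k))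
        = (fun h : List (String × String) =>
            must_keys.countP (fun k => text_has_key (PySem.Str.lower (hitText h)) k) == must_keys.length) :=
      funext fun h => pv_all_eq_countP _ _
    have hQ : (fun h => must_keys.any (fun k => text_has_key (PySem.Str.lower (hitText h)) k))
        = (fun h : List (String × String) =>
            decide (0 < must_keys.countP (fun k => text_has_key (PySem.Str.lower (hitText h)) k))) :=
      funext fun h => pv_any_eq_countP _ _
    simp only [hP, hQ, List.map_id', List.nil_append]
    exact pv_select _ _ _

-- ===== VERDICT (by name: the statement is the Claim_ definition above) =====
theorem filter_hits_by_must_py_spec : Claim_equal_filter_hits_by_must_py := by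
  intro hits must_keys _ _
  exact filter_hits_by_must_py_spec_aux hits must_keys
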